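-- pv_equiv track=rewrite | github.com/thanujamaheepala/computerVision | noiceFiltering.py | getMedianFilteredArray
-- ===== SOURCE A (Python) =====
-- def getMedianFilteredArray(imageArray,filterArray):
--     f=len(filterArray)
--     N = len(imageArray)
--     M = len(imageArray[0])
--     result_array = []
--     for x in range(N-(f-1)):
--         result_row = []
--         for y in range(M-(f-1)):
--             resultArray = []
--             for i in range(x,x+f):
--                 for j in range (y,y+f):
--                     resultArray.append(imageArray[i][j])
--             resultArray.sort()
--             mid = len(resultArray) // 2
--             res = (int(resultArray[mid]) + int(resultArray[~mid]))/ 2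
--             result_row.append(int(res))
--         result_array.append(result_row)
--     return result_array
-- ===== SOURCE B (Python) =====
-- def _merge(a, b):
--     # merge two sorted lists
--     out = []
--     i = j = 0
--     while i < len(a) and j < len(b):
--         if a[i] <= b[j]:
--             out.append(a[i]); i += 1
--         else:
--             out.append(b[j]); j += 1
--     out.extend(a[i:])
--     out.extend(b[j:])
--     return out
--
-- def getMedianFilteredArray(imageArray, filterArray):
--     f = len(filterArray)
--     N = len(imageArray)
--     M = len(imageArray[0])
--     result = []
--     for x in range(N - f + 1):
--         band = imageArray[x:x + f]
--         # each vertical f-strip of the band, sorted once and reused by every window of this band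
--         strips = [sorted(row[j] for row in band) for j in range(M)]
--         row_out = []
--         for y in range(M - f + 1):
--             win = strips[y]
--             for j in range(y + 1, y + f):
--                 win = _merge(win, strips[j])
--             L = f * f
--             lo = win[(L - 1) // 2]
--             hi = win[L // 2]
--             row_out.append(int((lo + hi) / 2))
--         result.append(row_out)
--     return result
-- ===== Notes on version B (the rewrite author's own statement) =====
-- stated objective: alternative
-- what changed: Instead of gathering and fully sorting every f*f window from scratch, B sorts each vertical f-strip of a row band once, reuses these sorted column strips across all windows of the band, and obtains each window's sorted order by merging f sorted strips; the two middle elements are then averaged exactly as A does.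
-- outside the precondition, e.g. on getMedianFilteredArray([[1], [], [2]], [7, 7]): A returns [[], []], B raises IndexError
import Mathlib
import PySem

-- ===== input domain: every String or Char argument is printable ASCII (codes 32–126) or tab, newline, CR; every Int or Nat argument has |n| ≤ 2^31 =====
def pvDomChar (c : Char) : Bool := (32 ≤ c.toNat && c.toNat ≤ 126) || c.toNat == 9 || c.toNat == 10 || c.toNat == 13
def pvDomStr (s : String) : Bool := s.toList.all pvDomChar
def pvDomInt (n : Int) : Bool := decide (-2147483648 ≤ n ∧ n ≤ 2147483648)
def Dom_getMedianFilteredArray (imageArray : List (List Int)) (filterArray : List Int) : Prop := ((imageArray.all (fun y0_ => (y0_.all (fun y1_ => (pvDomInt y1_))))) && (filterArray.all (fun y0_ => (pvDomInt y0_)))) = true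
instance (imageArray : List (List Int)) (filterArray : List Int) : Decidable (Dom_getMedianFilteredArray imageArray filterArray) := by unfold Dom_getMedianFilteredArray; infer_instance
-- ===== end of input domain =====

-- B replaces A's per-window gather-and-sort by per-band sorted column strips, reused by
-- every window of the band and combined by merging (objective: alternative, not timed faster).

-- ===== PORT A =====
def getMedianFilteredArray (imageArray : List (List Int)) (filterArray : List Int) : List (List Int) :=
  let f : Int := PySem.List.len filterArray
  let N : Int := PySem.List.len imageArray
  let M : Int := PySem.List.len (PySem.List.pyGetD imageArray 0 [])
  (PySem.List.pyRange 0 (N - (f - 1)) 1).foldl (fun result_array x =>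
    let result_row := (PySem.List.pyRange 0 (M - (f - 1)) 1).foldl (fun result_row y =>
      let resultArray := (PySem.List.pyRange x (x + f) 1).foldl (fun acc i =>
        (PySem.List.pyRange y (y + f) 1).foldl (fun acc j =>
          acc ++ [PySem.List.pyGetD (PySem.List.pyGetD imageArray i []) j 0]) acc) []
      let sortedA := PySem.List.sorted resultArray (fun v => v) false
      let mid : Int := PySem.Int.floordiv (PySem.List.len sortedA) 2
      let res : Int := PySem.Int.truncdiv
        (PySem.List.pyGetD sortedA mid 0 + PySem.List.pyGetD sortedA (-mid - 1) 0) 2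
      result_row ++ [res]) []
    result_array ++ [result_row]) []

-- ===== PORT B =====
def mergeAlt : List Int → List Int → List Int
  | [], b => b
  | a, [] => a
  | x :: xs, y :: ys =>
      if x ≤ y then x :: mergeAlt xs (y :: ys) else y :: mergeAlt (x :: xs) ys

def getMedianFilteredArray_alt (imageArray : List (List Int)) (filterArray : List Int) : List (List Int) :=
  let f : Int := PySem.List.len filterArray
  let N : Int := PySem.List.len imageArray
  let M : Int := PySem.List.len (PySem.List.pyGetD imageArray 0 [])
  (PySem.List.pyRange 0 (N - f + 1) 1).foldl (fun result x =>
    let band := PySem.List.slice imageArray (some x) (some (x + f))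
    let strips := (PySem.List.pyRange 0 M 1).map (fun j =>
      PySem.List.sorted (band.map (fun row => PySem.List.pyGetD row j 0)) (fun v => v) false)
    let row_out := (PySem.List.pyRange 0 (M - f + 1) 1).foldl (fun row_out y =>
      let win := (PySem.List.pyRange (y + 1) (y + f) 1).foldl
        (fun w j => mergeAlt w (PySem.List.pyGetD strips j []))
        (PySem.List.pyGetD strips y [])
      let L : Int := f * f
      let lo := PySem.List.pyGetD win (PySem.Int.floordiv (L - 1) 2) 0
      let hi := PySem.List.pyGetD win (PySem.Int.floordiv L 2) 0
      row_out ++ [PySem.Int.truncdiv (lo + hi) 2]) []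
    result ++ [row_out]) []


-- ===== PRECONDITION & SPEC =====
-- Python A raises IndexError on empty imageArray (imageArray[0]), on empty filterArray
-- (resultArray[0] on the empty window), and, whenever at least one band exists (f <= N),
-- on rows shorter than M = len(imageArray[0]).  In the corner f <= N and M < f, A returns
-- rows of [] without reading the image while B's eager column strips raise IndexError on
-- rows shorter than M; Pre_ excludes those ragged inputs too (see claim.json cites).
def Pre_getMedianFilteredArray (imageArray : List (List Int)) (filterArray : List Int) : Prop :=
  imageArray ≠ [] ∧ filterArray ≠ [] ∧
  (filterArray.length ≤ imageArray.length →
    ∀ row ∈ imageArray, (imageArray.headD []).length ≤ row.length)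
instance (imageArray : List (List Int)) (filterArray : List Int) : Decidable (Pre_getMedianFilteredArray imageArray filterArray) := by unfold Pre_getMedianFilteredArray; infer_instance

def pvWitness_getMedianFilteredArray : List (List Int) × List Int := ([[1, 2], [3, 4]], [0, 0])

def Spec_getMedianFilteredArray (imageArray : List (List Int)) (filterArray : List Int) (out : List (List Int)) : Prop := out = getMedianFilteredArray_alt imageArray filterArray
instance (imageArray : List (List Int)) (filterArray : List Int) (out : List (List Int)) : Decidable (Spec_getMedianFilteredArray imageArray filterArray out) := by unfold Spec_getMedianFilteredArray; infer_instance

-- ===== CLAIM (what is proved, stated in full; the proofs are below) =====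
def Claim_equal_getMedianFilteredArray : Prop := ∀ (imageArray : List (List Int)) (filterArray : List Int), Dom_getMedianFilteredArray imageArray filterArray → Pre_getMedianFilteredArray imageArray filterArray → Spec_getMedianFilteredArray imageArray filterArray (getMedianFilteredArray imageArray filterArray)

-- ===== LEMMAS AND PROOFS =====
theorem mergeAlt_eq_merge (a b : List Int) : mergeAlt a b = a.merge b (fun x y => decide (x ≤ y)) := by
  fun_induction mergeAlt a b <;> simp_all

theorem pv_cons_flatMap_perm (l : List Int) (a : Int → Int) (g : Int → List Int) :
    (l.flatMap fun j => a j :: g j).Perm (l.map a ++ l.flatMap g) := by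
  induction l with
  | nil => simp
  | cons j js ih =>
      simp only [List.flatMap_cons, List.map_cons, List.cons_append]
      refine List.Perm.cons _ ?_
      have h1 := List.Perm.append_left (g j) ih
      have h2 : (g j ++ (js.map a ++ js.flatMap g)).Perm (js.map a ++ (g j ++ js.flatMap g)) := by
        rw [← List.append_assoc, ← List.append_assoc]
        exact (List.perm_append_comm).append_right _
      exact h1.trans h2

theorem pv_transpose_perm (l₁ l₂ : List Int) (v : Int → Int → Int) :
    (l₁.flatMap fun i => l₂.map (v i)).Perm (l₂.flatMap fun j => l₁.map (fun i => v i j)) := by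
  induction l₁ with
  | nil => simp
  | cons i is ih =>
      simp only [List.flatMap_cons, List.map_cons]
      refine List.Perm.trans ?_ (pv_cons_flatMap_perm l₂ (fun j => v i j) (fun j => is.map (fun i' => v i' j))).symm
      exact List.Perm.append_left _ ih

theorem pv_band_map (imageArray : List (List Int)) (x : Int) (f : Nat) (g : List Int → Int)
    (hx : 0 ≤ x) (hxf : x + f ≤ (imageArray.length : Int)) :
    (PySem.List.slice imageArray (some x) (some (x + f))).map g
      = (PySem.List.pyRange x (x + f) 1).map (fun i => g (PySem.List.pyGetD imageArray i [])) := by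
  rw [PySem.List.slice_toNat _ hx (by omega), PySem.List.pyRange_one]
  have hT : ((x + f).toNat - x.toNat) = f := by omega
  have hT2 : (x + (f:Int) - x).toNat = f := by omega
  rw [hT, hT2]
  apply List.ext_getElem
  · simp; omega
  · intro k hk1 hk2
    have hk : k < f := by simp at hk1; omega
    have hkx : x.toNat + k < imageArray.length := by omega
    simp only [List.getElem_map, List.getElem_take, List.getElem_drop, List.getElem_range]
    congr 1
    have hxk : x + (k:Int) = ((x.toNat + k : Nat) : Int) := by omega
    rw [hxk, PySem.List.pyGetD_natCast, List.getD_eq_getElem _ _ hkx]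

theorem pv_merge_fold (g : Int → List Int) (a : Int) (n : Nat) (init : List Int)
    (h1 : init.Pairwise (· ≤ ·)) :
    (((PySem.List.pyRange a (a + n) 1).foldl
        (fun w j => mergeAlt w (PySem.List.sorted (g j) (fun v => v) false)) init).Pairwise (· ≤ ·)) ∧
    (((PySem.List.pyRange a (a + n) 1).foldl
        (fun w j => mergeAlt w (PySem.List.sorted (g j) (fun v => v) false)) init).Perm
      (init ++ (PySem.List.pyRange a (a + n) 1).flatMap g)) := by
  induction n with
  | zero =>
      have h0 : PySem.List.pyRange a (a + (0:Nat)) 1 = [] := by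
        apply PySem.List.pyRange_one_eq_nil; omega
      rw [h0]; simp [h1]
  | succ m ih =>
      have hsplit : PySem.List.pyRange a (a + ((m : Nat) + 1 : Nat)) 1
          = PySem.List.pyRange a (a + m) 1 ++ [a + m] := by
        have h := PySem.List.pyRange_one_succ_right (show a ≤ a + (m:Int) by omega)
        rw [show (a + (((m : Nat) + 1 : Nat) : Int)) = a + (m:Int) + 1 by push_cast; ring, h]
      rw [hsplit, List.foldl_append, List.flatMap_append]
      simp only [List.foldl_cons, List.foldl_nil, List.flatMap_cons, List.flatMap_nil, List.append_nil]
      obtain ⟨hp, hperm⟩ := ih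
      rw [mergeAlt_eq_merge]
      constructor
      · exact List.Pairwise.merge hp (PySem.List.sorted_pairwise _ _)
      · refine (List.merge_perm_append _).trans ?_
        rw [← List.append_assoc]
        exact (hperm.append (PySem.List.sorted_perm (g (a + m)) (fun v => v) false))

theorem pv_main (imageArray : List (List Int)) (filterArray : List Int)
    (hf : filterArray ≠ []) :
    getMedianFilteredArray imageArray filterArray = getMedianFilteredArray_alt imageArray filterArray := by
  have hf1 : 1 ≤ filterArray.length := List.length_pos_of_ne_nil hf
  simp only [getMedianFilteredArray, getMedianFilteredArray_alt, PySem.List.len_eq,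
    PySem.List.foldl_append_singleton_eq_map, List.nil_append]
  rw [show ((imageArray.length : Int) - ((filterArray.length : Int) - 1))
        = (imageArray.length : Int) - (filterArray.length : Int) + 1 from by ring,
      show (((PySem.List.pyGetD imageArray 0 []).length : Int) - ((filterArray.length : Int) - 1))
        = ((PySem.List.pyGetD imageArray 0 []).length : Int) - (filterArray.length : Int) + 1 from by ring]
  apply List.map_congr_left
  intro x hx
  apply List.map_congr_left
  intro y hy
  rw [PySem.List.mem_pyRange_one] at hx hy
  set fn : Nat := filterArray.length with hfn
  set fI : Int := (filterArray.length : Int) with hfI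
  set N : Int := (imageArray.length : Int) with hN
  set M : Int := ((PySem.List.pyGetD imageArray 0 []).length : Int) with hM
  set v : Int → Int → Int := fun i j => PySem.List.pyGetD (PySem.List.pyGetD imageArray i []) j 0 with hv
  set colList : Int → List Int := fun j => (PySem.List.pyRange x (x + fI) 1).map (fun i => v i j) with hcol
  -- A's window, as a flatMap
  rw [PySem.List.foldl_append_eq_flatMap, List.nil_append]
  set W : List Int := (PySem.List.pyRange x (x + fI) 1).flatMap
      (fun i => (PySem.List.pyRange y (y + fI) 1).map (v i)) with hW
  -- strips lookups
  have hstrips : ∀ j : Int, 0 ≤ j → j < M →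
      PySem.List.pyGetD ((PySem.List.pyRange 0 M 1).map (fun j =>
        PySem.List.sorted ((PySem.List.slice imageArray (some x) (some (x + fI))).map
          (fun row => PySem.List.pyGetD row j 0)) (fun v => v) false)) j []
        = PySem.List.sorted (colList j) (fun v => v) false := by
    intro j hj0 hjM
    rw [PySem.List.pyGetD_map_pyRange_of_nonneg _ _ _ _ hj0 hjM]
    rw [show x + fI = x + (fn : Int) from by rw [hfI], pv_band_map imageArray x fn _ (by omega) (by omega)]
  obtain ⟨hx0, hxN⟩ := hx
  obtain ⟨hy0, hyM⟩ := hy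
  rw [hstrips y hy0 (by omega)]
  rw [PySem.List.foldl_congr_mem _ _
        (fun w j => mergeAlt w (PySem.List.sorted (colList j) (fun v => v) false)) _
        (by
          intro acc j hj
          rw [PySem.List.mem_pyRange_one] at hj
          rw [hstrips j (by omega) (by omega)])]
  have hnm : y + fI = (y + 1) + ((fn - 1 : Nat) : Int) := by omega
  rw [hnm]
  obtain ⟨hwP, hwPerm⟩ := pv_merge_fold colList (y + 1) (fn - 1)
    (PySem.List.sorted (colList y) (fun v => v) false) (PySem.List.sorted_pairwise _ _)
  set win := (PySem.List.pyRange (y + 1) ((y + 1) + ((fn - 1 : Nat) : Int)) 1).foldl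
      (fun w j => mergeAlt w (PySem.List.sorted (colList j) (fun v => v) false))
      (PySem.List.sorted (colList y) (fun v => v) false) with hwin
  -- win is a permutation of A's window
  have hwin_perm_W : win.Perm W := by
    have h2 : (PySem.List.sorted (colList y) (fun v => v) false).Perm (colList y) :=
      PySem.List.sorted_perm _ _ _
    have h3 : win.Perm (colList y ++ (PySem.List.pyRange (y + 1) ((y + 1) + ((fn - 1 : Nat) : Int)) 1).flatMap colList) :=
      hwPerm.trans (h2.append (List.Perm.refl _))
    have h4 : PySem.List.pyRange y (y + fI) 1
        = y :: PySem.List.pyRange (y + 1) ((y + 1) + ((fn - 1 : Nat) : Int)) 1 := by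
      rw [← hnm]
      exact PySem.List.pyRange_one_cons (by omega)
    have h5 : win.Perm ((PySem.List.pyRange y (y + fI) 1).flatMap colList) := by
      rw [h4, List.flatMap_cons]
      exact h3
    refine h5.trans ?_
    rw [hW, hcol]
    exact (pv_transpose_perm (PySem.List.pyRange x (x + fI) 1) (PySem.List.pyRange y (y + fI) 1) v).symm
  have hsorted : PySem.List.sorted W (fun v => v) false = win :=
    PySem.List.sorted_id_eq_of_perm_of_pairwise W win hwin_perm_W hwP
  rw [hsorted]
  -- lengths
  have hlenW : W.length = fn * fn := by
    rw [hW, List.length_flatMap]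
    simp only [List.length_map, PySem.List.length_pyRange_one]
    rw [show (y + fI - y).toNat = fn from by omega, List.map_const', List.sum_replicate,
        smul_eq_mul, PySem.List.length_pyRange_one, show (x + fI - x).toNat = fn from by omega]
  have hlwin : win.length = fn * fn := hwin_perm_W.length_eq.trans hlenW
  have hL1 : 1 ≤ fn * fn := Nat.one_le_iff_ne_zero.mpr (by positivity)
  rw [hlwin, show fI * fI = ((fn * fn : Nat) : Int) from by push_cast; rw [hfI, hfn]]
  set L : Nat := fn * fn with hLdef
  have hfd1 : PySem.Int.floordiv ((L : Nat) : Int) 2 = ((L / 2 : Nat) : Int) := by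
    exact_mod_cast PySem.Int.floordiv_natCast L 2
  have hfd2 : PySem.Int.floordiv (((L : Nat) : Int) - 1) 2 = (((L - 1) / 2 : Nat) : Int) := by
    rw [show ((L : Nat) : Int) - 1 = (((L - 1 : Nat) : Nat) : Int) from by omega]
    exact_mod_cast PySem.Int.floordiv_natCast (L - 1) 2
  rw [hfd1, hfd2]
  have hg1 : PySem.List.pyGetD win ((L / 2 : Nat) : Int) 0 = win[L / 2]'(by omega) := by
    rw [PySem.List.pyGetD_natCast, List.getD_eq_getElem _ _ (by omega)]
  have hg2 : PySem.List.pyGetD win (-((L / 2 : Nat) : Int) - 1) 0 = win[L - (L / 2 + 1)]'(by omega) := by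
    rw [show -((L / 2 : Nat) : Int) - 1 = -(((L / 2 + 1 : Nat) : Nat) : Int) from by push_cast; ring]
    rw [PySem.List.pyGetD_neg_natCast win (L / 2 + 1) 0 (by omega) (by omega)]
    congr 1
    omega
  have hg3 : PySem.List.pyGetD win (((L - 1) / 2 : Nat) : Int) 0 = win[(L - 1) / 2]'(by omega) := by
    rw [PySem.List.pyGetD_natCast, List.getD_eq_getElem _ _ (by omega)]
  rw [hg1, hg2, hg3]
  have hidx : L - (L / 2 + 1) = (L - 1) / 2 := by omega
  congr 1
  simp only [hidx]
  ring

-- ===== VERDICT (by name: the statement is the Claim_ definition above) =====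
theorem getMedianFilteredArray_spec : Claim_equal_getMedianFilteredArray := by
  intro imageArray filterArray _hdom hpre
  unfold Spec_getMedianFilteredArray
  exact pv_main imageArray filterArray hpre.2.1
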